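-- pv_equiv track=rewrite | github.com/taektegi/2023_TGwinG_FE_kimtaeksoo | 4week_assignment.py | double
-- ===== SOURCE A (Python) =====
-- def double(lst):
--     n=0
--     for i in lst:
--         for j in lst:
--             if i==2*j:
--                 n+=1
--             else :
--                 pass
--     return n
-- ===== SOURCE B (Python) =====
-- def double(lst):
--     # Count each value once, then for each j add how many elements equal 2*j.
--     cnt = {}
--     for x in lst:
--         cnt[x] = cnt.get(x, 0) + 1
--     total = 0
--     for j in lst:
--         total += cnt.get(2 * j, 0)
--     return total
-- ===== Notes on version B (the rewrite author's own statement) =====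
-- stated objective: faster
-- what changed: Replaces the quadratic nested scan with a one-pass dict counter followed by a single pass summing cnt[2*j].
import Mathlib
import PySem

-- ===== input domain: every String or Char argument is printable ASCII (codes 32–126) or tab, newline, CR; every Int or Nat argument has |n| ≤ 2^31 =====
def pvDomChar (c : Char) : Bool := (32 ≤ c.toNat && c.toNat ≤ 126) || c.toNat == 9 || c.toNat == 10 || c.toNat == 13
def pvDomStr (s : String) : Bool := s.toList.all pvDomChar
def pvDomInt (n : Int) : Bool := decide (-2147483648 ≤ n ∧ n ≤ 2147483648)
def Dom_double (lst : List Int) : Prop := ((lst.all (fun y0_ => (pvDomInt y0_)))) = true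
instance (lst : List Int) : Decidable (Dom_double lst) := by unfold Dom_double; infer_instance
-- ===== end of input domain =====

-- B replaces A's quadratic nested scan with a one-pass dict counter plus a single summing pass (asymptotically faster).


-- ===== PORT A =====
def double (lst : List Int) : Int :=
  lst.foldl (fun n i =>
    lst.foldl (fun n j => if i == 2 * j then n + 1 else n) n) 0

-- ===== PORT B =====
def double_alt (lst : List Int) : Int :=
  let cnt := lst.foldl (fun d x => d.insert x (d.getD x 0 + 1)) PySem.Dict.empty
  lst.foldl (fun total j => total + cnt.getD (2 * j) 0) 0

-- ===== PRECONDITION & SPEC =====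
def Spec_double (lst : List Int) (out : Int) : Prop := out = double_alt lst
instance (lst : List Int) (out : Int) : Decidable (Spec_double lst out) := by unfold Spec_double; infer_instance

-- ===== CLAIM (what is proved, stated in full; the proofs are below) =====
def Claim_equal_double : Prop := ∀ (lst : List Int), Dom_double lst → Spec_double lst (double lst)

-- ===== LEMMAS AND PROOFS =====

-- exchanging the order of a double list sum
theorem pv_sum_sum_comm (l1 l2 : List Int) (f : Int → Int → Int) :
    (l1.map (fun i => (l2.map (f i)).sum)).sum
      = (l2.map (fun j => (l1.map (fun i => f i j)).sum)).sum := by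
  induction l1 with
  | nil => simp
  | cons a t ih => simp [ih]

-- A as a sum over i of the count of j's with i = 2*j
theorem pv_double_eq_sum (lst : List Int) :
    double lst = (lst.map (fun i => ((lst.countP (fun j => i == 2 * j) : Nat) : Int))).sum := by
  unfold double
  have h : (fun (n : Int) (i : Int) =>
      lst.foldl (fun n j => if i == 2 * j then n + 1 else n) n)
      = fun n i => n + ((lst.countP (fun j => i == 2 * j) : Nat) : Int) := by
    funext n i
    exact PySem.List.foldl_count_if (fun j => i == 2 * j) lst n
  rw [h, PySem.List.foldl_add]
  simp

-- B as a sum over j of the count of i's equal to 2*j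
theorem pv_double_alt_eq_sum (lst : List Int) :
    double_alt lst = (lst.map (fun j => ((lst.count (2 * j) : Nat) : Int))).sum := by
  show List.foldl _ 0 lst = _
  rw [PySem.Dict.foldl_insert_getD_add_one_eq_counter]
  have h : (fun (total : Int) (j : Int) => total + (PySem.Dict.counter lst).getD (2 * j) 0)
      = fun total j => total + ((lst.count (2 * j) : Nat) : Int) := by
    funext total j
    rw [PySem.Dict.getD_counter]
  rw [h, PySem.List.foldl_add]
  simp

-- ===== VERDICT (by name: the statement is the Claim_ definition above) =====
theorem double_spec : Claim_equal_double := by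
  intro lst _
  unfold Spec_double
  rw [pv_double_eq_sum, pv_double_alt_eq_sum]
  simp only [List.count]
  simp only [← PySem.List.sum_map_ite_one_zero]
  exact pv_sum_sum_comm lst lst (fun i j => if i == 2 * j then 1 else 0)
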